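-- pv_equiv track=rewrite | github.com/duundichjames/Mapsi | mapsi/inline_styles.py | resolve_charpr
-- ===== SOURCE A (Python) =====
-- from typing import Iterable
--
-- BODY_CHARPR_ID = "7"
--
-- INLINE_MARK_KINDS = frozenset({"bold", "italic", "strike", "code"})
--
-- INLINE_CHARPR: dict[frozenset[str], str] = {
--     frozenset({"bold"}):                 "25",
--     frozenset({"italic"}):               "26",
--     frozenset({"bold", "italic"}):       "27",
--     frozenset({"strike"}):               "28",
--     frozenset({"code"}):                 "29",
-- }
--
-- MARK_PRIORITY: tuple[str, ...] = ("bold", "italic", "strike", "code")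
--
-- def resolve_charpr(marks: Iterable[str]) -> str:
--     """마크 집합으로부터 charPr ID 를 결정한다.
--
--     Args:
--         marks: 활성 인라인 마크 종류 (``"bold"`` / ``"italic"`` /
--             ``"strike"`` / ``"code"``). 알 수 없는 종류는 조용히 무시.
--
--     Returns:
--         ``templates/Contents/header.xml`` 의 ``hh:charPr/@id`` 문자열.
--         빈 입력은 본문 charPr (= :data:`BODY_CHARPR_ID`) 를 돌려준다.
--
--     Notes:
--         디그레이드 알고리즘:
--
--         1. 알 수 없는 마크는 제거 (``INLINE_MARK_KINDS`` 와 교집합).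
--         2. 정확 매치가 있으면 즉시 반환.
--         3. ``MARK_PRIORITY`` 의 *역순* (낮은 순위부터) 으로 마크를
--            1 개씩 빼며 사전을 다시 본다.
--         4. 마크 0 개로 줄면 본문 charPr 반환.
--     """
--     active = frozenset(m for m in marks if m in INLINE_MARK_KINDS)
--     if not active:
--         return BODY_CHARPR_ID
--     if active in INLINE_CHARPR:
--         return INLINE_CHARPR[active]
--     remaining = set(active)
--     for kind in reversed(MARK_PRIORITY):
--         if kind in remaining:
--             remaining.discard(kind)
--             key = frozenset(remaining)
--             if not key:
--                 return BODY_CHARPR_ID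
--             if key in INLINE_CHARPR:
--                 return INLINE_CHARPR[key]
--     return BODY_CHARPR_ID
-- ===== SOURCE B (Python) =====
-- BODY_CHARPR_ID = "7"
-- INLINE_MARK_KINDS = frozenset({"bold", "italic", "strike", "code"})
--
-- def resolve_charpr(marks):
--     active = {m for m in marks if m in INLINE_MARK_KINDS}
--     if "bold" in active and "italic" in active:
--         return "27"
--     if "bold" in active:
--         return "25"
--     if "italic" in active:
--         return "26"
--     if "strike" in active:
--         return "28"
--     if "code" in active:
--         return "29"
--     return BODY_CHARPR_ID
-- ===== Notes on version B (the rewrite author's own statement) =====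
-- stated objective: simpler
-- what changed: Replaced the exact-match dict lookup plus reverse-priority mark-degradation loop with a single flat priority cascade over the known marks (bold+italic, then bold, italic, strike, code), which returns the same charPr ID on every input.
import Mathlib
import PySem

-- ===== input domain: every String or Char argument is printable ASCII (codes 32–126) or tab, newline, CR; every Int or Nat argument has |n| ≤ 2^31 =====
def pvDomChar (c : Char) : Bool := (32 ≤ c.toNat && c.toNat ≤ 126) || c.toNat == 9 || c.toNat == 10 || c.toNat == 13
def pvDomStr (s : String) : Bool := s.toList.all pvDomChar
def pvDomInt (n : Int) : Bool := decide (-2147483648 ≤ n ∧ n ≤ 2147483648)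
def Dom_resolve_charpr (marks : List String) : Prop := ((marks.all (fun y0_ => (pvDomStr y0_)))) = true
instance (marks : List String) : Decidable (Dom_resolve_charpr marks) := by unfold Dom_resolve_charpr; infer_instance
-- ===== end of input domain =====

-- B replaces A's exact-match dict lookup + reverse-priority degradation loop by a flat
-- priority cascade over the known marks (objective: simpler); same return value everywhere.

-- ===== PORT A =====
-- INLINE_MARK_KINDS (a frozenset of 4 distinct literals; membership test only)
def pvKinds : List String := ["bold", "italic", "strike", "code"]

-- INLINE_CHARPR: dict keyed by frozensets; lookup = first key equal *as a set*
def pvCharpr : List (List String × String) :=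
  [(["bold"], "25"), (["italic"], "26"), (["bold", "italic"], "27"),
   (["strike"], "28"), (["code"], "29")]

def pvLookup? (s : PySem.Set String) : Option String :=
  (pvCharpr.find? (fun p => PySem.Set.equal p.1 s)).map (·.2)

-- the 'for kind in reversed(MARK_PRIORITY)' degradation loop, remaining as mutable state
def pvDegrade : List String → PySem.Set String → String
  | [], _ => "7"
  | kind :: rest, remaining =>
    if PySem.Set.contains remaining kind then
      let r := PySem.Set.discard remaining kind
      if r.isEmpty then "7"
      else
        match pvLookup? r with
        | some v => v
        | none => pvDegrade rest r
    else pvDegrade rest remaining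

def resolve_charpr (marks : List String) : String :=
  let active : PySem.Set String :=
    PySem.Set.ofList (marks.filter (fun m => pvKinds.contains m))
  if active.isEmpty then "7"
  else
    match pvLookup? active with
    | some v => v
    | none => pvDegrade ["code", "strike", "italic", "bold"] active

-- ===== PORT B =====
def resolve_charpr_alt (marks : List String) : String :=
  let active : PySem.Set String :=
    PySem.Set.ofList (marks.filter (fun m => pvKinds.contains m))
  if PySem.Set.contains active "bold" && PySem.Set.contains active "italic" then "27"
  else if PySem.Set.contains active "bold" then "25"
  else if PySem.Set.contains active "italic" then "26"
  else if PySem.Set.contains active "strike" then "28"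
  else if PySem.Set.contains active "code" then "29"
  else "7"

-- ===== PRECONDITION & SPEC =====
def Spec_resolve_charpr (marks : List String) (out : String) : Prop := out = resolve_charpr_alt marks
instance (marks : List String) (out : String) : Decidable (Spec_resolve_charpr marks out) := by unfold Spec_resolve_charpr; infer_instance

-- ===== CLAIM (what is proved, stated in full; the proofs are below) =====
def Claim_equal_resolve_charpr : Prop := ∀ (marks : List String), Dom_resolve_charpr marks → Spec_resolve_charpr marks (resolve_charpr marks)

-- ===== LEMMAS AND PROOFS =====

-- proof-side bodies of the two ports, as functions of the already-built 'active' set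
def pvACore (s : PySem.Set String) : String :=
  if s.isEmpty then "7"
  else
    match pvLookup? s with
    | some v => v
    | none => pvDegrade ["code", "strike", "italic", "bold"] s

def pvBCore (s : PySem.Set String) : String :=
  if PySem.Set.contains s "bold" && PySem.Set.contains s "italic" then "27"
  else if PySem.Set.contains s "bold" then "25"
  else if PySem.Set.contains s "italic" then "26"
  else if PySem.Set.contains s "strike" then "28"
  else if PySem.Set.contains s "code" then "29"
  else "7"

-- canonical set with a given membership profile
def pvCanon (b i st c : Bool) : List String :=
  (if b then ["bold"] else []) ++ (if i then ["italic"] else []) ++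
  (if st then ["strike"] else []) ++ (if c then ["code"] else [])

lemma pvContains_ext {s t : List String} (h : ∀ x, x ∈ s ↔ x ∈ t) (x : String) :
    PySem.Set.contains s x = PySem.Set.contains t x := by
  by_cases hx : x ∈ s
  · rw [(PySem.Set.contains_iff s x).mpr hx, (PySem.Set.contains_iff t x).mpr ((h x).mp hx)]
  · have h1 : PySem.Set.contains s x = false :=
      Bool.not_eq_true _ |>.mp (fun hh => hx ((PySem.Set.contains_iff s x).mp hh))
    have h2 : PySem.Set.contains t x = false :=
      Bool.not_eq_true _ |>.mp (fun hh => hx ((h x).mpr ((PySem.Set.contains_iff t x).mp hh)))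
    rw [h1, h2]

lemma pvEqual_ext {s t : List String} (h : ∀ x, x ∈ s ↔ x ∈ t) (k : List String) :
    PySem.Set.equal k s = PySem.Set.equal k t := by
  by_cases hk : ∀ x, x ∈ k ↔ x ∈ s
  · rw [(PySem.Set.equal_iff k s).mpr hk,
        (PySem.Set.equal_iff k t).mpr (fun x => (hk x).trans (h x))]
  · have h1 : PySem.Set.equal k s = false :=
      Bool.not_eq_true _ |>.mp (fun hh => hk ((PySem.Set.equal_iff k s).mp hh))
    have h2 : PySem.Set.equal k t = false :=
      Bool.not_eq_true _ |>.mp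
        (fun hh => hk (fun x => ((PySem.Set.equal_iff k t).mp hh x).trans (h x).symm))
    rw [h1, h2]

lemma pvIsEmpty_ext {s t : List String} (h : ∀ x, x ∈ s ↔ x ∈ t) :
    s.isEmpty = t.isEmpty := by
  by_cases hs : s = []
  · subst hs
    have : t = [] := List.eq_nil_iff_forall_not_mem.mpr (fun x hx => by simpa using (h x).mpr hx)
    simp [this]
  · have ht : t ≠ [] := fun hh => hs (List.eq_nil_iff_forall_not_mem.mpr
      (fun x hx => by simpa [hh] using (h x).mp hx))
    simp [List.isEmpty_eq_false_iff.mpr hs, List.isEmpty_eq_false_iff.mpr ht]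

lemma pvLookup_ext {s t : List String} (h : ∀ x, x ∈ s ↔ x ∈ t) :
    pvLookup? s = pvLookup? t := by
  unfold pvLookup?
  have : (fun p : List String × String => PySem.Set.equal p.1 s)
       = (fun p : List String × String => PySem.Set.equal p.1 t) :=
    funext fun p => pvEqual_ext h p.1
  rw [this]

lemma pvDegrade_ext (kinds : List String) {s t : List String}
    (h : ∀ x, x ∈ s ↔ x ∈ t) : pvDegrade kinds s = pvDegrade kinds t := by
  induction kinds generalizing s t with
  | nil => rfl
  | cons kind rest ih =>
    have hd : ∀ x, x ∈ PySem.Set.discard s kind ↔ x ∈ PySem.Set.discard t kind := by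
      intro x
      rw [PySem.Set.mem_discard, PySem.Set.mem_discard]
      exact and_congr_left' (h x)
    simp only [pvDegrade, pvContains_ext h kind, pvIsEmpty_ext hd, pvLookup_ext hd]
    split <;> [skip; exact ih h]
    split <;> [rfl; skip]
    split
    · rfl
    · exact ih hd

lemma pvACore_ext {s t : List String} (h : ∀ x, x ∈ s ↔ x ∈ t) :
    pvACore s = pvACore t := by
  unfold pvACore
  rw [pvIsEmpty_ext h, pvLookup_ext h, pvDegrade_ext _ h]

lemma pvBCore_ext {s t : List String} (h : ∀ x, x ∈ s ↔ x ∈ t) :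
    pvBCore s = pvBCore t := by
  unfold pvBCore
  rw [pvContains_ext h "bold", pvContains_ext h "italic",
      pvContains_ext h "strike", pvContains_ext h "code"]

lemma pvMem_canon (x : String) (b i st c : Bool) :
    x ∈ pvCanon b i st c ↔
      (b = true ∧ x = "bold") ∨ (i = true ∧ x = "italic") ∨
      (st = true ∧ x = "strike") ∨ (c = true ∧ x = "code") := by
  cases b <;> cases i <;> cases st <;> cases c <;> simp [pvCanon]

lemma pvCanon_ext (s : List String) (hs : ∀ x ∈ s, x ∈ pvKinds) (x : String) :
    x ∈ s ↔ x ∈ pvCanon (decide ("bold" ∈ s)) (decide ("italic" ∈ s))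
                        (decide ("strike" ∈ s)) (decide ("code" ∈ s)) := by
  rw [pvMem_canon]
  constructor
  · intro hx
    have := hs x hx
    simp only [pvKinds, List.mem_cons, List.not_mem_nil, or_false] at this
    rcases this with h | h | h | h <;> subst h <;> simp [hx]
  · rintro (⟨hb, rfl⟩ | ⟨hi, rfl⟩ | ⟨hst, rfl⟩ | ⟨hc, rfl⟩) <;>
      first
        | exact of_decide_eq_true hb
        | exact of_decide_eq_true hi
        | exact of_decide_eq_true hst
        | exact of_decide_eq_true hc

lemma pvCore_canon (b i st c : Bool) :
    pvACore (pvCanon b i st c) = pvBCore (pvCanon b i st c) := by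
  cases b <;> cases i <;> cases st <;> cases c <;> decide

-- ===== VERDICT (by name: the statement is the Claim_ definition above) =====
theorem resolve_charpr_spec : Claim_equal_resolve_charpr := by
  intro marks _
  show resolve_charpr marks = resolve_charpr_alt marks
  have hA : resolve_charpr marks
      = pvACore (PySem.Set.ofList (marks.filter (fun m => pvKinds.contains m))) := rfl
  have hB : resolve_charpr_alt marks
      = pvBCore (PySem.Set.ofList (marks.filter (fun m => pvKinds.contains m))) := rfl
  rw [hA, hB]
  have hs : ∀ x ∈ PySem.Set.ofList (marks.filter (fun m => pvKinds.contains m)), x ∈ pvKinds := by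
    intro x hx
    have hx' := (PySem.Set.mem_ofList _ _).mp hx
    exact (List.mem_filter.mp hx').2 |> fun h => (List.contains_iff_mem).mp h
  have hext := pvCanon_ext _ hs
  rw [pvACore_ext hext, pvBCore_ext hext, pvCore_canon]
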